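-- pv_equiv track=rewrite | github.com/YashChvan/Machine-Learning | TNeGA_internship/ANPR/predict.py | get_type
-- ===== SOURCE A (Python) =====
-- def get_type(s):
--     char_seg_count = 0
--     prev_i = 0
--     number = ["0","1","2","3","4","5","6","7","8","9"]
--     for i in range(1,len(s)):
--         if(s[i] not in number and s[i-1] not in number):
--             continue
--         elif (s[i] in number and s[i-1] not in number):
--             char_seg_count += 1
--         else:
--             continue
--
--     if(char_seg_count ==1):
--         return 2
--     else:
--         return 1
-- ===== SOURCE B (Python) =====
-- DIGITS = "0123456789"
--
-- def get_type(s):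
--     # Map the string to a 'c'/'d' mask (nondigit/digit), then count the
--     # nondigit->digit boundaries as occurrences of the substring "cd".
--     mask = "".join("d" if c in DIGITS else "c" for c in s)
--     return 2 if mask.count("cd") == 1 else 1
-- ===== Notes on version B (the rewrite author's own statement) =====
-- stated objective: faster
-- what changed: A scans index pairs range(1,len(s)) with a three-branch if/elif chain counting nondigit-to-digit transitions; B instead maps the string once to a two-letter digit mask and counts the boundary pattern with str.count, which runs in C.
import Mathlib
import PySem

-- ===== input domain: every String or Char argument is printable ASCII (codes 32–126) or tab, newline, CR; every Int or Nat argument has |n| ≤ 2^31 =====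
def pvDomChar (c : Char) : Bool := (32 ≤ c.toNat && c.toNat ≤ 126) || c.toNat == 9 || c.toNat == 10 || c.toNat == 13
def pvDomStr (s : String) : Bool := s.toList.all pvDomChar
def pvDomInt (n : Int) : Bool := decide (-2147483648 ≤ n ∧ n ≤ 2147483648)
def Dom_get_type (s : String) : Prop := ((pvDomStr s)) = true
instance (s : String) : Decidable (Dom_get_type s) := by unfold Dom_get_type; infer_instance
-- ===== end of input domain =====

-- B replaces A's index-pair loop by mapping the string to a two-letter digit mask and
-- counting the nondigit-to-digit boundary pattern with str.count; measurably faster (C-level count).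


-- ===== PORT A =====
-- literal port of A: loop i over range(1, len(s)); s[i] is always in range, so
-- pyGetD with an arbitrary default ' ' is exact here (totality guard only)
def get_type (s : String) : Int :=
  let number : List Char := ['0','1','2','3','4','5','6','7','8','9']
  let cnt : Int := (PySem.List.pyRange 1 (PySem.Str.len s) 1).foldl
    (fun acc i =>
      if PySem.List.pyGetD s.toList i ' ' ∉ number ∧ PySem.List.pyGetD s.toList (i-1) ' ' ∉ number then acc
      else if PySem.List.pyGetD s.toList i ' ' ∈ number ∧ PySem.List.pyGetD s.toList (i-1) ' ' ∉ number then acc + 1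
      else acc) 0
  if cnt = 1 then 2 else 1

-- ===== PORT B =====
-- ''.join of one-char strings over s is exactly a map over s.toList
def get_type_alt (s : String) : Int :=
  let mask : List Char := s.toList.map (fun c => if c ∈ "0123456789".toList then 'd' else 'c')
  if PySem.Chars.count mask ['c','d'] = 1 then 2 else 1

-- ===== PRECONDITION & SPEC =====
def Spec_get_type (s : String) (out : Int) : Prop := out = get_type_alt s
instance (s : String) (out : Int) : Decidable (Spec_get_type s out) := by unfold Spec_get_type; infer_instance

-- ===== CLAIM (what is proved, stated in full; the proofs are below) =====
def Claim_equal_get_type : Prop := ∀ (s : String), Dom_get_type s → Spec_get_type s (get_type s)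

-- ===== LEMMAS AND PROOFS =====

def pvIsD (c : Char) : Bool := c ∈ ['0','1','2','3','4','5','6','7','8','9']

def pvMask (l : List Char) : List Char := l.map (fun c => if pvIsD c then 'd' else 'c')

def pvPairCount : List Char → Nat
  | a :: b :: t => (if pvIsD b = true ∧ pvIsD a = false then 1 else 0) + pvPairCount (b :: t)
  | _ => 0

theorem pv_go_nil (sub : List Char) (fuel acc : Nat) :
    PySem.Chars.count.go sub fuel [] acc = acc := by
  cases fuel <;> simp [PySem.Chars.count.go]

theorem pv_go_mask (fuel : Nat) : ∀ (l : List Char) (acc : Nat), l.length ≤ fuel →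
    PySem.Chars.count.go ['c','d'] fuel (pvMask l) acc = acc + pvPairCount l := by
  induction fuel with
  | zero =>
    intro l acc h
    have : l = [] := List.eq_nil_of_length_eq_zero (Nat.le_zero.mp h)
    subst this; simp [pvPairCount, PySem.Chars.count.go]
  | succ fuel ih =>
    intro l acc h
    match l with
    | [] => simp [pvMask, pvPairCount, PySem.Chars.count.go]
    | [a] =>
      by_cases hd : pvIsD a = true <;>
        simp [pvMask, pvPairCount, PySem.Chars.count.go, hd, List.isPrefixOf, pv_go_nil]
    | a :: b :: t =>
      by_cases ha : pvIsD a = true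
      · -- head maps to 'd': no match at position 0
        have : PySem.Chars.count.go ['c','d'] (fuel+1) (pvMask (a :: b :: t)) acc
            = PySem.Chars.count.go ['c','d'] fuel (pvMask (b :: t)) acc := by
          simp [pvMask, PySem.Chars.count.go, ha, List.isPrefixOf]
        rw [this, ih (b :: t) acc (by simpa using Nat.le_of_succ_le_succ h)]
        simp [pvPairCount, ha]
      · by_cases hb : pvIsD b = true
        · -- 'c' then 'd': match, skip two characters
          have step : PySem.Chars.count.go ['c','d'] (fuel+1) (pvMask (a :: b :: t)) acc
              = PySem.Chars.count.go ['c','d'] fuel (pvMask t) (acc + 1) := by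
            simp [pvMask, PySem.Chars.count.go, ha, hb, List.isPrefixOf]
          rw [step, ih t (acc+1) (by simp at h ⊢; omega)]
          have hbt : pvPairCount (b :: t) = pvPairCount t := by
            match t with
            | [] => rfl
            | c :: t' => simp [pvPairCount, hb]
          simp [pvPairCount, ha, hb, hbt]; omega
        · -- 'c' then 'c': no match
          have : PySem.Chars.count.go ['c','d'] (fuel+1) (pvMask (a :: b :: t)) acc
              = PySem.Chars.count.go ['c','d'] fuel (pvMask (b :: t)) acc := by
            simp [pvMask, PySem.Chars.count.go, ha, hb, List.isPrefixOf]
          rw [this, ih (b :: t) acc (by simpa using Nat.le_of_succ_le_succ h)]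
          simp [pvPairCount, hb]

theorem pv_count_mask (l : List Char) :
    PySem.Chars.count (pvMask l) ['c','d'] = pvPairCount l := by
  have hlen : (pvMask l).length = l.length := by simp [pvMask]
  have h0 := pv_go_mask l.length l 0 (le_refl _)
  simp [PySem.Chars.count, hlen, h0]

theorem pv_sum_pairCount : ∀ (l : List Char),
    ((List.range (l.length - 1)).map
      (fun k => if pvIsD (l.getD (k+1) ' ') = true ∧ pvIsD (l.getD k ' ') = false then (1:Int) else 0)).sum
      = (pvPairCount l : Int)
  | [] => by simp [pvPairCount]
  | [a] => by simp [pvPairCount]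
  | a :: b :: t => by
    have ih := pv_sum_pairCount (b :: t)
    simp only [List.length_cons, Nat.add_sub_cancel] at ih ⊢
    rw [List.range_succ_eq_map]
    simp only [List.map_cons, List.sum_cons, List.map_map]
    have heq : (List.range t.length).map
        ((fun k => if pvIsD ((a :: b :: t).getD (k+1) ' ') = true ∧ pvIsD ((a :: b :: t).getD k ' ') = false then (1:Int) else 0) ∘ (fun k => k + 1))
        = (List.range t.length).map
        (fun k => if pvIsD ((b :: t).getD (k+1) ' ') = true ∧ pvIsD ((b :: t).getD k ' ') = false then (1:Int) else 0) := by
      apply List.map_congr_left; intro k _; simp [Function.comp]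
    rw [heq, ih]
    simp [pvPairCount]

theorem pv_digits_toList : "0123456789".toList = ['0','1','2','3','4','5','6','7','8','9'] := by decide

theorem pv_mask_eq (s : String) :
    s.toList.map (fun c => if c ∈ "0123456789".toList then 'd' else 'c') = pvMask s.toList := by
  apply List.map_congr_left; intro c _
  simp [pv_digits_toList, pvIsD]

theorem pv_cnt_eq (s : String) :
    (PySem.List.pyRange 1 (PySem.Str.len s) 1).foldl
      (fun acc i =>
        if PySem.List.pyGetD s.toList i ' ' ∉ ['0','1','2','3','4','5','6','7','8','9'] ∧
           PySem.List.pyGetD s.toList (i-1) ' ' ∉ ['0','1','2','3','4','5','6','7','8','9'] then acc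
        else if PySem.List.pyGetD s.toList i ' ' ∈ ['0','1','2','3','4','5','6','7','8','9'] ∧
           PySem.List.pyGetD s.toList (i-1) ' ' ∉ ['0','1','2','3','4','5','6','7','8','9'] then acc + 1
        else acc) 0
    = (pvPairCount s.toList : Int) := by
  set l := s.toList with hl
  set number : List Char := ['0','1','2','3','4','5','6','7','8','9'] with hnum
  have hstep : (PySem.List.pyRange 1 (PySem.Str.len s) 1).foldl
      (fun acc i =>
        if PySem.List.pyGetD l i ' ' ∉ number ∧ PySem.List.pyGetD l (i-1) ' ' ∉ number then acc
        else if PySem.List.pyGetD l i ' ' ∈ number ∧ PySem.List.pyGetD l (i-1) ' ' ∉ number then acc + 1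
        else acc) 0
      = (PySem.List.pyRange 1 (PySem.Str.len s) 1).foldl
      (fun acc i => acc + (if PySem.List.pyGetD l i ' ' ∈ number ∧ PySem.List.pyGetD l (i-1) ' ' ∉ number then (1:Int) else 0)) 0 := by
    apply PySem.List.foldl_congr_mem; intro acc i _
    by_cases h1 : PySem.List.pyGetD l i ' ' ∈ number <;>
      by_cases h2 : PySem.List.pyGetD l (i-1) ' ' ∈ number <;> simp [h1, h2]
  rw [hstep, PySem.List.foldl_add]
  have hn : PySem.Str.len s = (l.length : Int) := by simp [hl]
  rw [hn, PySem.List.pyRange_one]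
  have hT : ((l.length : Int) - 1).toNat = l.length - 1 := by omega
  rw [hT]
  simp only [List.map_map]
  have heq : (List.range (l.length - 1)).map
      ((fun i => if PySem.List.pyGetD l i ' ' ∈ number ∧ PySem.List.pyGetD l (i-1) ' ' ∉ number then (1:Int) else 0) ∘ (fun (k : Nat) => 1 + (k : Int)))
      = (List.range (l.length - 1)).map
      (fun k => if pvIsD (l.getD (k+1) ' ') = true ∧ pvIsD (l.getD k ' ') = false then (1:Int) else 0) := by
    apply List.map_congr_left; intro k _
    have h1 : (1 : Int) + (k : Int) = ((k + 1 : Nat) : Int) := by push_cast; ring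
    have h2 : ((k + 1 : Nat) : Int) - 1 = ((k : Nat) : Int) := by push_cast; ring
    simp only [Function.comp, h1, h2, PySem.List.pyGetD_natCast]
    simp [pvIsD, hnum]
  rw [heq, pv_sum_pairCount]
  simp

-- ===== VERDICT (by name: the statement is the Claim_ definition above) =====
theorem get_type_spec : Claim_equal_get_type := by
  intro s _
  unfold Spec_get_type get_type get_type_alt
  simp only [pv_mask_eq, pv_count_mask, pv_cnt_eq]
  have : (pvPairCount s.toList : Int) = 1 ↔ pvPairCount s.toList = 1 := by omega
  split_ifs with h1 h2 h2 <;> first | rfl | (exfalso; omega)
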